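-- pv_equiv track=rewrite | github.com/TilenKelc/vaje_10_UvR | topovske_bitke.py | najbolj_napaden
-- ===== SOURCE A (Python) =====
-- def se_napadata(top1, top2):
--     if (top1[0] == top2[0] or top1[1] == top2[1]) and top1 != top2:
--         return True
--     else:
--         return False
--
-- def najbolj_napaden(topovi):
--     if topovi:
--         temp = []
--         for t1 in topovi:
--             count = 0
--             for t2 in topovi:
--                 if se_napadata(t1, t2):
--                     count += 1
--             temp = temp + [count]
--         if max(temp):
--             return topovi[temp.index(max(temp))]
--     return None
-- ===== SOURCE B (Python) =====
-- def najbolj_napaden(topovi):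
--     rows = {}
--     cols = {}
--     pos = {}
--     for t in topovi:
--         rows[t[0]] = rows.get(t[0], 0) + 1
--         cols[t[1]] = cols.get(t[1], 0) + 1
--         pos[t] = pos.get(t, 0) + 1
--     best = None
--     best_c = 0
--     for t in topovi:
--         c = rows[t[0]] + cols[t[1]] - 2 * pos[t]
--         if best_c < c:
--             best = t
--             best_c = c
--     return best
-- ===== Notes on version B (the rewrite author's own statement) =====
-- stated objective: faster
-- what changed: Replaces the quadratic all-pairs attack count plus max/index passes by one counting pass building row/column/position frequency dicts, computing each rook's attack count by inclusion-exclusion and tracking the first strict maximum in a single scan.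
import Mathlib
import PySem

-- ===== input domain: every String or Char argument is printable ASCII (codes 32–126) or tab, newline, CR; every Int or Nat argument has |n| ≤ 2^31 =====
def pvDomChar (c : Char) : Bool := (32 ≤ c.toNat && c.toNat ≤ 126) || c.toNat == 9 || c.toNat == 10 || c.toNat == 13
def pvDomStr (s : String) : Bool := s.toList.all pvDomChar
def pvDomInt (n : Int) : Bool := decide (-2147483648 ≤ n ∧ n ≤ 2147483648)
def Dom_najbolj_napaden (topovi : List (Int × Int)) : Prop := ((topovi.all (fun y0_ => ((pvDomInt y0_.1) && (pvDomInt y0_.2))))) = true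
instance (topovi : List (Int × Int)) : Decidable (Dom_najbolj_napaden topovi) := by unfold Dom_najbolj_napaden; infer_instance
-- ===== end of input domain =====

-- B replaces A's quadratic all-pairs counting by one linear counting pass with
-- frequency dicts (inclusion-exclusion) and a single first-strict-max scan.

-- ===== PORT A =====
def seNapadata (top1 top2 : Int × Int) : Bool :=
  if (top1.1 == top2.1 || top1.2 == top2.2) && top1 != top2 then true else false

def najbolj_napaden (topovi : List (Int × Int)) : Option (Int × Int) :=
  if topovi ≠ [] then
    let temp := topovi.foldl (fun temp t1 =>
      temp ++ [topovi.foldl (fun count t2 =>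
        if seNapadata t1 t2 then count + 1 else count) (0 : Int)]) []
    match PySem.List.max? temp (fun y => y) with
    | none => none
    | some m =>
      if m ≠ 0 then
        match PySem.List.index? temp m with
        | some i => PySem.List.pyGet? topovi (i : Int)
        | none => none
      else none
  else none

-- ===== PORT B =====
def najbolj_napaden_alt (topovi : List (Int × Int)) : Option (Int × Int) :=
  let d := topovi.foldl
    (fun (s : PySem.Dict Int Int × PySem.Dict Int Int × PySem.Dict (Int × Int) Int) t =>
      (s.1.insert t.1 (s.1.getD t.1 0 + 1),
       s.2.1.insert t.2 (s.2.1.getD t.2 0 + 1),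
       s.2.2.insert t (s.2.2.getD t 0 + 1)))
    (PySem.Dict.empty, PySem.Dict.empty, PySem.Dict.empty)
  let st := topovi.foldl
    (fun (st : Option (Int × Int) × Int) t =>
      let c := d.1.getD t.1 0 + d.2.1.getD t.2 0 - 2 * d.2.2.getD t 0
      if st.2 < c then (some t, c) else st)
    (none, 0)
  st.1

-- ===== PRECONDITION & SPEC =====
def Spec_najbolj_napaden (topovi : List (Int × Int)) (out : Option (Int × Int)) : Prop := out = najbolj_napaden_alt topovi
instance (topovi : List (Int × Int)) (out : Option (Int × Int)) : Decidable (Spec_najbolj_napaden topovi out) := by unfold Spec_najbolj_napaden; infer_instance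

-- ===== CLAIM (what is proved, stated in full; the proofs are below) =====
def Claim_equal_najbolj_napaden : Prop := ∀ (topovi : List (Int × Int)), Dom_najbolj_napaden topovi → Spec_najbolj_napaden topovi (najbolj_napaden topovi)

-- ===== LEMMAS AND PROOFS =====

-- A's attack count of t: the inner loop of port A as a function.
def fA (topovi : List (Int × Int)) (t : Int × Int) : Int :=
  topovi.foldl (fun count t2 => if seNapadata t t2 then count + 1 else count) 0

lemma fA_nonneg (l : List (Int × Int)) (t : Int × Int) : 0 ≤ fA l t := by
  unfold fA; rw [PySem.List.foldl_if_add_one]; positivity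

-- inclusion-exclusion: B's dict-count formula equals A's pairwise count
lemma counts_eq_fA (l : List (Int × Int)) (t : Int × Int) :
    ((l.map Prod.fst).count t.1 : Int) + ((l.map Prod.snd).count t.2 : Int)
      - 2 * (l.count t : Int) = fA l t := by
  unfold fA
  rw [PySem.List.foldl_if_add_one]
  induction l with
  | nil => simp
  | cons x l ih =>
    simp only [List.countP_cons, List.count_cons, List.map_cons, seNapadata] at *
    by_cases h1 : x.1 = t.1 <;> by_cases h2 : x.2 = t.2 <;>
      by_cases h3 : x = t <;>
      simp_all [Prod.ext_iff] <;> omega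

-- a fold with three independent dict accumulators is three folds
lemma foldl_triple {α β γ δ : Type} (F : α → δ → α) (G1 : β → δ → β) (G2 : γ → δ → γ)
    (l : List δ) (a : α) (b : β) (c : γ) :
    l.foldl (fun s t => (F s.1 t, G1 s.2.1 t, G2 s.2.2 t)) (a, b, c)
      = (l.foldl F a, l.foldl G1 b, l.foldl G2 c) := by
  induction l generalizing a b c with
  | nil => rfl
  | cons x l ih => simpa using ih (F a x) (G1 b x) (G2 c x)

lemma alt_dict_eq (topovi : List (Int × Int)) :
    topovi.foldl
      (fun (s : PySem.Dict Int Int × PySem.Dict Int Int × PySem.Dict (Int × Int) Int) t =>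
        (s.1.insert t.1 (s.1.getD t.1 0 + 1),
         s.2.1.insert t.2 (s.2.1.getD t.2 0 + 1),
         s.2.2.insert t (s.2.2.getD t 0 + 1)))
      (PySem.Dict.empty, PySem.Dict.empty, PySem.Dict.empty)
    = (topovi.foldl (fun d t => d.insert t.1 (d.getD t.1 0 + 1)) PySem.Dict.empty,
       topovi.foldl (fun d t => d.insert t.2 (d.getD t.2 0 + 1)) PySem.Dict.empty,
       topovi.foldl (fun d t => d.insert t (d.getD t 0 + 1)) PySem.Dict.empty) :=
  foldl_triple (fun (d : PySem.Dict Int Int) t => d.insert t.1 (d.getD t.1 0 + 1))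
    (fun (d : PySem.Dict Int Int) t => d.insert t.2 (d.getD t.2 0 + 1))
    (fun (d : PySem.Dict (Int × Int) Int) t => d.insert t (d.getD t 0 + 1)) topovi _ _ _

-- each frequency dict, looked up with default 0, is a count over the projected list
lemma keyed_getD (topovi : List (Int × Int)) {κ : Type} [DecidableEq κ]
    (k : Int × Int → κ) (v : κ) :
    (topovi.foldl (fun d t => d.insert (k t) (d.getD (k t) 0 + 1)) PySem.Dict.empty).getD v 0
    = ((topovi.map k).count v : Int) := by
  have h : topovi.foldl (fun d t => d.insert (k t) (d.getD (k t) 0 + 1)) PySem.Dict.empty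
      = (topovi.map k).foldl
          (fun (d : PySem.Dict κ Int) v => d.insert v (d.getD v 0 + 1)) PySem.Dict.empty :=
    (List.foldl_map (f := k)
      (g := fun (d : PySem.Dict κ Int) v => d.insert v (d.getD v 0 + 1))
      (l := topovi) (init := PySem.Dict.empty)).symm
  rw [h, PySem.Dict.getD_foldl_insert_add_one]
  simp [PySem.Dict.getD_empty]

lemma id_getD (topovi : List (Int × Int)) (v : Int × Int) :
    (topovi.foldl (fun d t => d.insert t (d.getD t 0 + 1)) PySem.Dict.empty).getD v 0
    = (topovi.count v : Int) := by
  rw [PySem.Dict.getD_foldl_insert_add_one]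
  simp [PySem.Dict.getD_empty]

lemma foldl_max_attain {α : Type} (f : α → Int) (l : List α) (a : Int) :
    l.foldl (fun m t => max m (f t)) a = a ∨
      ∃ x ∈ l, l.foldl (fun m t => max m (f t)) a = f x := by
  induction l generalizing a with
  | nil => left; rfl
  | cons x l ih =>
    rcases ih (max a (f x)) with h | ⟨y, hy, h⟩
    · simp only [List.foldl_cons, h]
      rcases max_choice a (f x) with h' | h'
      · left; exact h'
      · right; exact ⟨x, List.mem_cons_self, h'⟩
    · right; exact ⟨y, List.mem_cons_of_mem _ hy, h⟩

-- B's single scan returns the first rook attaining the (positive) maximum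
lemma scan_eq {α : Type} [DecidableEq α] (f : α → Int) (l : List α) :
    l.foldl (fun st t => if st.2 < f t then (some t, f t) else st)
      ((none : Option α), (0 : Int))
    = (if 0 < l.foldl (fun m t => max m (f t)) 0 then
         l.find? (fun t => f t == l.foldl (fun m t => max m (f t)) 0)
       else none,
       l.foldl (fun m t => max m (f t)) 0) := by
  induction l using List.reverseRecOn with
  | nil => simp
  | append_singleton l t ih =>
    have hub := (PySem.List.le_foldl_max_int l f 0).2
    have h0 : (0:Int) ≤ l.foldl (fun m t => max m (f t)) 0 :=
      (PySem.List.le_foldl_max_int l f 0).1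
    set M := l.foldl (fun m t => max m (f t)) 0 with hM
    rw [List.foldl_append, List.foldl_append, ih]
    simp only [List.foldl_cons, List.foldl_nil]
    by_cases hlt : M < f t
    · rw [if_pos hlt]
      have hM' : max M (f t) = f t := max_eq_right (le_of_lt hlt)
      rw [hM', if_pos (lt_of_le_of_lt h0 hlt)]
      rw [List.find?_append]
      have : l.find? (fun x => f x == f t) = none := by
        rw [List.find?_eq_none]
        intro x hx
        simp only [beq_iff_eq]
        exact ne_of_lt (lt_of_le_of_lt (hub x hx) hlt)
      simp [this]
    · rw [if_neg hlt]
      have hM' : max M (f t) = M := max_eq_left (le_of_not_gt hlt)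
      rw [hM']
      by_cases hpos : 0 < M
      · rw [if_pos hpos, if_pos hpos, List.find?_append]
        rcases foldl_max_attain f l 0 with h | ⟨x, hx, h⟩
        · omega
        · have : (l.find? (fun y => f y == M)).isSome := by
            rw [List.find?_isSome]
            exact ⟨x, hx, by rw [beq_iff_eq, ← h, hM]⟩
          rcases Option.isSome_iff_exists.mp this with ⟨y, hy⟩
          simp [hy]
      · simp [hpos]

-- A's index-of-max lookup is find? of the first element with maximal count
lemma index_get_eq_find {α : Type} [DecidableEq α] (l : List α) (f : α → Int) (m : Int) :
    (match PySem.List.index? (l.map f) m with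
     | some i => PySem.List.pyGet? l (i : Int)
     | none => none)
    = l.find? (fun t => f t == m) := by
  induction l with
  | nil => rfl
  | cons x l ih =>
    simp only [List.map_cons, List.find?_cons, PySem.List.index?, List.idxOf?_cons]
    by_cases h : f x = m
    · simp [h, PySem.List.pyGet?, PySem.List.pyIdx?]
    · have hb : (f x == m) = false := by simp [h]
      simp only [hb]
      rw [← ih]
      simp only [PySem.List.index?]
      cases hi : List.idxOf? m (l.map f) with
      | none => simp
      | some i =>
        simp only [Option.map_some]
        show PySem.List.pyGet? (x :: l) ((i + 1 : Nat) : Int) = PySem.List.pyGet? l (i : Int)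
        rw [PySem.List.pyGet?_natCast, PySem.List.pyGet?_natCast]
        simp

lemma max?_map_eq {α : Type} (f : α → Int) (hf : ∀ t, 0 ≤ f t) (x : α) (l : List α) :
    PySem.List.max? ((x :: l).map f) (fun y => y)
      = some ((x :: l).foldl (fun m t => max m (f t)) 0) := by
  rw [List.map_cons, PySem.List.max?_id_cons]
  congr 1
  rw [List.foldl_map]
  simp only [List.foldl_cons]
  rw [max_eq_right (hf x)]

-- ===== VERDICT (by name: the statement is the Claim_ definition above) =====
theorem najbolj_napaden_spec : Claim_equal_najbolj_napaden := by
  unfold Claim_equal_najbolj_napaden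
  intro topovi _
  unfold Spec_najbolj_napaden najbolj_napaden najbolj_napaden_alt
  rw [alt_dict_eq topovi]
  cases topovi with
  | nil => rfl
  | cons x l =>
    rw [if_pos (List.cons_ne_nil x l)]
    have htemp : (x :: l).foldl (fun temp t1 => temp ++
        [(x :: l).foldl (fun count t2 =>
          if seNapadata t1 t2 then count + 1 else count) (0 : Int)]) []
        = (x :: l).map (fA (x :: l)) := by
      have h := PySem.List.foldl_append_singleton_eq_map
        (l := x :: l) (f := fA (x :: l)) (acc := ([] : List Int))
      rw [List.nil_append] at h
      exact h
    rw [htemp]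
    dsimp only
    rw [max?_map_eq (fA (x :: l)) (fA_nonneg (x :: l)) x l]
    simp only [keyed_getD, id_getD, counts_eq_fA]
    rw [scan_eq (fA (x :: l)) (x :: l)]
    rw [index_get_eq_find (x :: l) (fA (x :: l))]
    have h0 : (0:Int) ≤ (x :: l).foldl (fun m t => max m (fA (x :: l) t)) 0 :=
      (PySem.List.le_foldl_max_int (x :: l) (fA (x :: l)) 0).1
    by_cases hz : (x :: l).foldl (fun m t => max m (fA (x :: l) t)) 0 = 0
    · simp [hz]
    · rw [if_pos hz, if_pos (lt_of_le_of_ne h0 (Ne.symm hz))]
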